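-- pv_equiv track=rewrite | github.com/Worldpay/access-checkout-ios | scripts/pactFix/fixPactContract.py | fix_json_path
-- ===== SOURCE A (Python) =====
-- def has_colon(value):
--     return value.find(":") > -1
--
-- def fix_json_path(value):
--
--     result = ""
--
--     for section in value.split("."):
--         if result:  # This is not the first loop
--             if has_colon(section):
--                 result += "['%s']" % section
--             else:
--                 result += ".%s" % section
--         else:  # First loop - don't change anything
--             result += section
--
--     return result
-- ===== SOURCE B (Python) =====
-- import re
--
-- def fix_json_path(value):
--     def repl(m):
--         group = m.group(1)
--         if ":" in group:
--             return "['%s']" % group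
--         return "." + group
--     return re.sub(r"\.([^.]*)", repl, value)
-- ===== Notes on version B (the rewrite author's own statement) =====
-- stated objective: idiomatic
-- what changed: Replaces A's split-on-dot loop with a 'first iteration' accumulator-emptiness flag by a single re.sub over the pattern \.([^.]*) with a replacer that brackets colon-containing sections, leaving text before the first dot untouched by construction.
-- intended difference: On values starting with '.' A's empty-accumulator test keeps skipping, so A silently drops the leading dots and never brackets the first non-empty section (A('.a:b') = 'a:b'), while B transforms every dot-prefixed section uniformly (B('.a:b') = "['a:b']"), which is the intended behaviour. — e.g. on fix_json_path(".a:b"): A returns "a:b", B returns "['a:b']"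
import Mathlib
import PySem

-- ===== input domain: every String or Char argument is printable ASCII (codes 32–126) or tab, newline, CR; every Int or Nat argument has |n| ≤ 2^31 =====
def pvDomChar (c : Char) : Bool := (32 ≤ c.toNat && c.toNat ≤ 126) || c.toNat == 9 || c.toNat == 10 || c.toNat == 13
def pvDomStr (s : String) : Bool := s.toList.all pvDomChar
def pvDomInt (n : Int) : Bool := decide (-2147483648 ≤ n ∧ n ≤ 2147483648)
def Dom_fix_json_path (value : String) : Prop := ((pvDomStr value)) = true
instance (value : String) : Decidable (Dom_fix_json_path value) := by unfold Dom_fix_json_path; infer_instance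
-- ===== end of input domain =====

-- B replaces A's split/loop/state-flag accumulation by a single regex substitution (re.sub with a
-- replacer); equivalence is proved outside D_ (values starting with '.'), where A's skip-while-empty
-- accumulator drops the leading dots and B keeps them.

-- ===== PORT A =====
def has_colon (value : List Char) : Bool := PySem.Chars.find value [':'] > -1

def fix_json_path (value : String) : String :=
  String.ofList
    ((PySem.Chars.splitOn value.toList ['.']).foldl
      (fun result sect =>
        if result ≠ [] then
          if has_colon sect then result ++ '[' :: '\'' :: (sect ++ ['\'', ']'])
          else result ++ '.' :: sect
        else result ++ sect)
      [])

-- ===== PORT B =====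
-- hand port of B's re.sub(r"\.([^.]*)", repl, value): text outside a match is copied verbatim
-- (pySubA); a '.' starts a match whose captured group is the following run of non-dots, collected
-- by pySubB and emitted through the replacer pyRepl.  Exact for this pattern: matches never
-- overlap or backtrack.
def pyRepl (g : List Char) : List Char :=
  if PySem.Chars.isIn [':'] g then '[' :: '\'' :: (g ++ ['\'', ']']) else '.' :: g

def pySubB (grp : List Char) : List Char → List Char
  | [] => pyRepl grp
  | c :: rest => if c = '.' then pyRepl grp ++ pySubB [] rest else pySubB (grp ++ [c]) rest

def pySubA : List Char → List Char
  | [] => []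
  | c :: rest => if c = '.' then pySubB [] rest else c :: pySubA rest

def fix_json_path_alt (value : String) : String := String.ofList (pySubA value.toList)

-- ===== PRECONDITION & SPEC =====
-- On values starting with '.', A's accumulator stays empty through the leading empty sections, so
-- it silently drops the leading dots and never brackets the first non-empty section; B transforms
-- those sections like any others, which is the intended uniform behaviour.
def D_fix_json_path (value : String) : Prop := PySem.Str.startswith value "." = true
instance (value : String) : Decidable (D_fix_json_path value) := by unfold D_fix_json_path; infer_instance

def Spec_fix_json_path (value : String) (out : String) : Prop :=
  ¬ D_fix_json_path value → out = fix_json_path_alt value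
instance (value : String) (out : String) : Decidable (Spec_fix_json_path value out) := by
  unfold Spec_fix_json_path; infer_instance

def pvDiffWitness_fix_json_path : String := ".a:b"
def pvDiffWitnessOut_fix_json_path : String × String := ("a:b", "['a:b']")

-- ===== CLAIM (what is proved, stated in full; the proofs are below) =====
def Claim_unchanged_fix_json_path : Prop :=
  ∀ (value : String), Dom_fix_json_path value → Spec_fix_json_path value (fix_json_path value)
def Claim_changed_fix_json_path : Prop :=
  Dom_fix_json_path (pvDiffWitness_fix_json_path) ∧
  D_fix_json_path (pvDiffWitness_fix_json_path) ∧
  fix_json_path (pvDiffWitness_fix_json_path) = pvDiffWitnessOut_fix_json_path.1 ∧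
  fix_json_path_alt (pvDiffWitness_fix_json_path) = pvDiffWitnessOut_fix_json_path.2 ∧
  pvDiffWitnessOut_fix_json_path.1 ≠ pvDiffWitnessOut_fix_json_path.2
def Claim_exact_fix_json_path : Prop :=
  ∀ (value : String), Dom_fix_json_path value → D_fix_json_path value →
    fix_json_path value ≠ fix_json_path_alt value

-- ===== LEMMAS AND PROOFS =====

-- simple one-char-step split on '.', the common reference shape for both ports
def splitD : List Char → List (List Char)
  | [] => [[]]
  | c :: rest =>
      if c = '.' then [] :: splitD rest
      else
        match splitD rest with
        | s :: ss => (c :: s) :: ss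
        | [] => [[c]]

theorem splitD_ne_nil (cs : List Char) : splitD cs ≠ [] := by
  induction cs with
  | nil => simp [splitD]
  | cons c rest ih =>
      simp only [splitD]
      split
      · simp
      · split <;> simp

-- the fuel loop behind PySem.Chars.splitOn computes splitD (single-char separator '.')
theorem go_eq (fuel : Nat) :
    ∀ (l cur : List Char) (acc : List (List Char)), l.length ≤ fuel →
      PySem.Chars.splitOn.go ['.'] fuel l cur acc
        = acc.reverse ++
            (match splitD l with
             | s :: ss => (cur.reverse ++ s) :: ss
             | [] => [cur.reverse]) := by
  induction fuel with
  | zero =>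
      intro l cur acc hl
      have : l = [] := List.length_eq_zero_iff.mp (Nat.le_zero.mp hl)
      subst this
      simp [PySem.Chars.splitOn.go, splitD]
  | succ fuel ih =>
      intro l cur acc hl
      cases l with
      | nil => simp [PySem.Chars.splitOn.go, splitD]
      | cons c rest =>
          by_cases hc : c = '.'
          · subst hc
            have h1 : PySem.Chars.splitOn.go ['.'] (fuel+1) ('.' :: rest) cur acc
                = PySem.Chars.splitOn.go ['.'] fuel rest [] (cur.reverse :: acc) := by
              simp [PySem.Chars.splitOn.go, List.isPrefixOf]
            rw [h1, ih rest [] _ (by simpa using Nat.le_of_succ_le_succ hl)]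
            have hne := splitD_ne_nil rest
            cases hsp : splitD rest with
            | nil => exact absurd hsp hne
            | cons s ss => simp [splitD, hsp]
          · have h1 : PySem.Chars.splitOn.go ['.'] (fuel+1) (c :: rest) cur acc
                = PySem.Chars.splitOn.go ['.'] fuel rest (c :: cur) acc := by
              simp only [PySem.Chars.splitOn.go, List.isPrefixOf]
              split
              · rename_i h
                simp at h
                exact absurd h.symm hc
              · rfl
            rw [h1, ih rest (c :: cur) acc (by simpa using Nat.le_of_succ_le_succ hl)]
            have hne := splitD_ne_nil rest
            cases hsp : splitD rest with
            | nil => exact absurd hsp hne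
            | cons s ss => simp [splitD, hc, hsp]

theorem splitOn_eq_splitD (cs : List Char) :
    PySem.Chars.splitOn cs ['.'] = splitD cs := by
  have h := go_eq (cs.length + 1) cs [] [] (Nat.le_succ _)
  have hne := splitD_ne_nil cs
  cases hsp : splitD cs with
  | nil => exact absurd hsp hne
  | cons s ss =>
      simpa [PySem.Chars.splitOn, hsp] using h

-- B's group collector, characterised against splitD
theorem pySubB_eq (cs : List Char) :
    ∀ grp, pySubB grp cs
      = (match splitD cs with
         | s :: ss => pyRepl (grp ++ s) ++ (ss.map pyRepl).flatten
         | [] => pyRepl grp) := by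
  induction cs with
  | nil => intro grp; simp [pySubB, splitD]
  | cons c rest ih =>
      intro grp
      by_cases hc : c = '.'
      · subst hc
        rw [show pySubB grp ('.' :: rest) = pyRepl grp ++ pySubB [] rest from by
              simp [pySubB]]
        rw [ih []]
        have hne := splitD_ne_nil rest
        cases hsp : splitD rest with
        | nil => exact absurd hsp hne
        | cons s ss => simp [splitD, hsp]
      · rw [show pySubB grp (c :: rest) = pySubB (grp ++ [c]) rest from by
              simp [pySubB, hc]]
        rw [ih (grp ++ [c])]
        have hne := splitD_ne_nil rest
        cases hsp : splitD rest with
        | nil => exact absurd hsp hne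
        | cons s ss => simp [splitD, hc, hsp]

def joinB : List (List Char) → List Char
  | [] => []
  | s :: ss => s ++ (ss.map pyRepl).flatten

theorem pySubA_eq (cs : List Char) : pySubA cs = joinB (splitD cs) := by
  induction cs with
  | nil => simp [pySubA, splitD, joinB]
  | cons c rest ih =>
      by_cases hc : c = '.'
      · subst hc
        rw [show pySubA ('.' :: rest) = pySubB [] rest from by simp [pySubA]]
        rw [pySubB_eq rest []]
        have hne := splitD_ne_nil rest
        cases hsp : splitD rest with
        | nil => exact absurd hsp hne
        | cons s ss => simp [splitD, hsp, joinB]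
      · rw [show pySubA (c :: rest) = c :: pySubA rest from by simp [pySubA, hc]]
        rw [ih]
        have hne := splitD_ne_nil rest
        cases hsp : splitD rest with
        | nil => exact absurd hsp hne
        | cons s ss => simp [splitD, hc, hsp, joinB]

-- A's branch test agrees with B's membership test
theorem has_colon_eq (s : List Char) : has_colon s = PySem.Chars.isIn [':'] s := by
  simp only [has_colon]
  by_cases h : [':'] <:+: s
  · have h0 : 0 ≤ PySem.Chars.find s [':'] := (PySem.Chars.find_nonneg_iff _ _).mpr h
    have hb : PySem.Chars.isIn [':'] s = true := (PySem.Chars.isIn_iff_infix _ _).mpr h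
    rw [hb]
    simpa using by omega
  · have hf : PySem.Chars.find s [':'] = -1 := (PySem.Chars.find_eq_neg_one_iff _ _).mpr h
    have hb : PySem.Chars.isIn [':'] s = false := (PySem.Chars.isIn_eq_false_iff _ _).mpr h
    rw [hb, hf]
    simp

def stepA (result sect : List Char) : List Char :=
  if result ≠ [] then
    if has_colon sect then result ++ '[' :: '\'' :: (sect ++ ['\'', ']'])
    else result ++ '.' :: sect
  else result ++ sect

theorem stepA_of_ne (r s : List Char) (hr : r ≠ []) : stepA r s = r ++ pyRepl s := by
  simp only [stepA, if_pos hr, pyRepl, has_colon_eq]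
  split <;> simp

theorem pyRepl_ne_nil (s : List Char) : pyRepl s ≠ [] := by
  simp only [pyRepl]; split <;> simp

theorem foldl_stepA_of_ne (ss : List (List Char)) :
    ∀ r, r ≠ [] → ss.foldl stepA r = r ++ (ss.map pyRepl).flatten := by
  induction ss with
  | nil => intro r _; simp
  | cons s t ih =>
      intro r hr
      rw [List.foldl_cons, stepA_of_ne r s hr,
          ih _ (by simp [pyRepl_ne_nil s])]
      simp

theorem length_pyRepl (s : List Char) : s.length + 1 ≤ (pyRepl s).length := by
  simp only [pyRepl]
  split
  · simp
  · simp

theorem foldl_stepA_lt (ss : List (List Char)) (hss : ss ≠ []) :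
    (ss.foldl stepA []).length < ((ss.map pyRepl).flatten).length := by
  induction ss with
  | nil => exact absurd rfl hss
  | cons s t ih =>
      have h1 : 1 ≤ (pyRepl s).length := le_trans (by omega) (length_pyRepl s)
      by_cases hs : s = []
      · subst hs
        cases t with
        | nil =>
            have hstep : stepA [] [] = [] := by simp [stepA]
            simp only [List.foldl_cons, hstep, List.foldl_nil, List.map_cons,
              List.map_nil, List.flatten_cons, List.flatten_nil, List.append_nil]
            simpa using h1
        | cons u v =>
            have hlt := ih (by simp)
            have hstep : stepA [] [] = [] := by simp [stepA]
            simp only [List.foldl_cons, hstep, List.map_cons, List.flatten_cons,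
              List.length_append] at *
            omega
      · rw [List.foldl_cons]
        have h0 : stepA [] s = s := by simp [stepA]
        rw [h0, foldl_stepA_of_ne t s hs]
        have := length_pyRepl s
        simp only [List.map_cons, List.flatten_cons, List.length_append]
        omega

-- A as a fold of stepA over splitD
theorem fix_json_path_eq (value : String) :
    fix_json_path value = String.ofList ((splitD value.toList).foldl stepA []) := by
  unfold fix_json_path
  rw [splitOn_eq_splitD]
  rfl

theorem startswith_head (value : String) :
    (PySem.Str.startswith value "." = true) ↔ value.toList.head? = some '.' := by
  rw [show PySem.Str.startswith value "." = PySem.Chars.startswith value.toList ['.'] from by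
        simp [pysem]]
  cases h : value.toList with
  | nil => simp [PySem.Chars.startswith, List.isPrefixOf]
  | cons c rest =>
      constructor
      · intro hs
        have : c = '.' := by
          by_contra hc
          simp [PySem.Chars.startswith, List.isPrefixOf] at hs
          exact hc hs.symm
        simp [this]
      · intro hs
        have : c = '.' := by simpa using hs
        simp [PySem.Chars.startswith, List.isPrefixOf, this]

-- ===== VERDICT (by name: the statement is the Claim_ definition above) =====
theorem fix_json_path_spec : Claim_unchanged_fix_json_path := by
  intro value _ hD
  rw [fix_json_path_eq]
  unfold fix_json_path_alt
  rw [pySubA_eq]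
  have hhead : value.toList.head? ≠ some '.' := by
    intro h
    exact hD ((startswith_head value).mpr h)
  cases hcs : value.toList with
  | nil => simp [splitD, joinB, stepA]
  | cons c rest =>
      have hc : c ≠ '.' := by
        intro h; exact hhead (by simp [hcs, h])
      have hsr := splitD_ne_nil rest
      cases hspr : splitD rest with
      | nil => exact absurd hspr hsr
      | cons s ss =>
          have hsp : splitD (c :: rest) = (c :: s) :: ss := by simp [splitD, hc, hspr]
          rw [hsp]
          rw [List.foldl_cons]
          have h0 : stepA [] (c :: s) = c :: s := by simp [stepA]
          rw [h0, foldl_stepA_of_ne ss (c :: s) (by simp)]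
          simp [joinB]

theorem fix_json_path_changed : Claim_changed_fix_json_path := by
  unfold Claim_changed_fix_json_path; decide

theorem fix_json_path_tight : Claim_exact_fix_json_path := by
  intro value _ hD heq
  have hhead : value.toList.head? = some '.' := (startswith_head value).mp hD
  cases hcs : value.toList with
  | nil => simp [hcs] at hhead
  | cons c rest =>
      have hc : c = '.' := by rw [hcs] at hhead; simpa using hhead
      subst hc
      have hA : fix_json_path value = String.ofList ((splitD rest).foldl stepA []) := by
        rw [fix_json_path_eq, hcs]
        have h2 : splitD ('.' :: rest) = [] :: splitD rest := by simp [splitD]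
        rw [h2, List.foldl_cons]
        have h3 : stepA [] [] = [] := by simp [stepA]
        rw [h3]
      have hB : fix_json_path_alt value
          = String.ofList (((splitD rest).map pyRepl).flatten) := by
        unfold fix_json_path_alt
        rw [hcs, pySubA_eq]
        have h2 : splitD ('.' :: rest) = [] :: splitD rest := by simp [splitD]
        rw [h2]
        simp [joinB]
      rw [hA, hB] at heq
      have hlen := foldl_stepA_lt (splitD rest) (splitD_ne_nil rest)
      have hlists : ((splitD rest).foldl stepA []) = ((splitD rest).map pyRepl).flatten := by
        have := congrArg String.toList heq
        simpa using this
      rw [hlists] at hlen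
      omega
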